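-- pv_equiv track=rewrite | github.com/Bogdanovmaksim/crypto_practises | pr3/cr_3.py | decrypt_ciphertext_autokey
-- ===== SOURCE A (Python) =====
-- ALPHABET = "ABCDEFGHIJKLMNOPQRSTUVWXYZ"
--
-- def decrypt_ciphertext_autokey(ciphertext, primer_key):
--     """
--     Дешифрование Виженера с автоключом по ШИФРТЕКСТУ.
--     Ключ формируется как: [Начальный ключ] + [Шифротекст]
--     """
--     plaintext = ""
--
--     key_stream = list(primer_key.upper()) + list(ciphertext.upper())
--
--     for i, char in enumerate(ciphertext.upper()):
--         if char in ALPHABET: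
--             c_idx = ALPHABET.index(char)
--             k_idx = ALPHABET.index(key_stream[i])
--
--             p_idx = (c_idx - k_idx) % len(ALPHABET)
--             p_char = ALPHABET[p_idx]
--
--             plaintext += p_char
--         else:
--             plaintext += char
--             key_stream.insert(i, char)
--
--     return plaintext
-- ===== SOURCE B (Python) =====
-- ALPHABET = "ABCDEFGHIJKLMNOPQRSTUVWXYZ"
--
-- def decrypt_ciphertext_autokey(ciphertext, primer_key):
--     """
--     Single pass: the keys A consumes are exactly the first letters of
--     primer.upper()+ciphertext.upper(), taken in order, one per alphabetic
--     ciphertext character; a pointer replaces A's list.insert bookkeeping.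
--     """
--     idx = {ch: i for i, ch in enumerate(ALPHABET)}
--     C = ciphertext.upper()
--     stream = primer_key.upper() + C
--     out = []
--     p = 0
--     for ch in C:
--         j = idx.get(ch)
--         if j is None:
--             out.append(ch)
--         else:
--             out.append(ALPHABET[(j - idx[stream[p]]) % 26])
--             p += 1
--     return "".join(out)
-- ===== Notes on version B (the rewrite author's own statement) =====
-- stated objective: faster
-- what changed: Replaces A's growing key_stream list with O(n) insert calls and O(26) ALPHABET.index scans per character by a single pass using a precomputed letter-index dict and a pointer into primer+ciphertext that advances only on alphabetic characters, joining a list of output chars.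
import Mathlib
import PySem

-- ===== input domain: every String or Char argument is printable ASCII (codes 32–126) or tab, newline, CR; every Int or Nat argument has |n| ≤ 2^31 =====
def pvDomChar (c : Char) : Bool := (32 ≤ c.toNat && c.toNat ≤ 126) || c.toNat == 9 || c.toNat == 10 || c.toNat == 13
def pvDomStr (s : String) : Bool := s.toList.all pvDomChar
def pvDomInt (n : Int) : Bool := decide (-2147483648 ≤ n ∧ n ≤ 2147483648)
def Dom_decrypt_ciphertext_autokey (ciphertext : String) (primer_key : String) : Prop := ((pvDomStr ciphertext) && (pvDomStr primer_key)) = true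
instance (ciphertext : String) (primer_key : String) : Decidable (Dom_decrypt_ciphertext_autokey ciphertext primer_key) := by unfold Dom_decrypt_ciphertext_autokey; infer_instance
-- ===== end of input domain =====

-- B replaces A's quadratic key_stream.insert bookkeeping by a single pass with a
-- pointer into primer+ciphertext that advances only on alphabet characters (objective: faster).

-- ===== PORT A =====
def pvALPHABET : List Char := "ABCDEFGHIJKLMNOPQRSTUVWXYZ".toList

-- one iteration of A's for-loop: state = (plaintext, key_stream), input = (i, char)
-- '.getD' defaults are unreachable inside Pre_ (a 'none' is exactly where Python raises ValueError)
def pvStepA (st : List Char × List Char) (ic : Int × Char) : List Char × List Char :=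
  if ic.2 ∈ pvALPHABET then
    let c_idx : Int := ((PySem.List.index? pvALPHABET ic.2).getD 0 : Nat)
    let k_idx : Int := ((PySem.List.index? pvALPHABET ((PySem.List.pyGet? st.2 ic.1).getD ' ')).getD 0 : Nat)
    let p_idx := PySem.Int.mod (c_idx - k_idx) 26
    (st.1 ++ [(PySem.List.pyGet? pvALPHABET p_idx).getD ' '], st.2)
  else
    (st.1 ++ [ic.2], PySem.List.insert st.2 ic.1 ic.2)

def decrypt_ciphertext_autokey (ciphertext : String) (primer_key : String) : String :=
  let C := PySem.Chars.upper ciphertext.toList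
  let key_stream := PySem.Chars.upper primer_key.toList ++ C
  String.mk ((PySem.List.enumerate C).foldl pvStepA ([], key_stream)).1

-- ===== PORT B =====
-- one iteration of B's for-loop: state = (out, pointer p into stream)
-- '.getD' defaults are unreachable inside Pre_ (a 'none' is exactly where Python raises KeyError)
def pvStepB (stream : List Char) (st : List Char × Nat) (ch : Char) : List Char × Nat :=
  match PySem.List.index? pvALPHABET ch with
  | none => (st.1 ++ [ch], st.2)
  | some j =>
    let k : Int := ((PySem.List.index? pvALPHABET ((PySem.List.pyGet? stream (st.2 : Int)).getD ' ')).getD 0 : Nat)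
    (st.1 ++ [(PySem.List.pyGet? pvALPHABET (PySem.Int.mod ((j : Int) - k) 26)).getD ' '], st.2 + 1)

def decrypt_ciphertext_autokey_alt (ciphertext : String) (primer_key : String) : String :=
  let C := PySem.Chars.upper ciphertext.toList
  let stream := PySem.Chars.upper primer_key.toList ++ C
  String.mk (C.foldl (pvStepB stream) ([], 0)).1

-- ===== PRECONDITION & SPEC =====
-- Python A raises ValueError (and Python B KeyError) exactly when one of the keys it consumes
-- is not an uppercase letter; the keys consumed are the first nA characters of
-- upper(primer)+upper(ciphertext), nA = number of alphabetic ciphertext characters.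
def Pre_decrypt_ciphertext_autokey (ciphertext : String) (primer_key : String) : Prop :=
  (((PySem.Chars.upper primer_key.toList ++ PySem.Chars.upper ciphertext.toList).take
      ((PySem.Chars.upper ciphertext.toList).countP (fun c => decide (c ∈ pvALPHABET)))).all
      (fun c => decide (c ∈ pvALPHABET))) = true
instance (ciphertext : String) (primer_key : String) : Decidable (Pre_decrypt_ciphertext_autokey ciphertext primer_key) := by unfold Pre_decrypt_ciphertext_autokey; infer_instance

def pvWitness_decrypt_ciphertext_autokey : String × String := ("B!", "A")

def Spec_decrypt_ciphertext_autokey (ciphertext : String) (primer_key : String) (out : String) : Prop := out = decrypt_ciphertext_autokey_alt ciphertext primer_key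
instance (ciphertext : String) (primer_key : String) (out : String) : Decidable (Spec_decrypt_ciphertext_autokey ciphertext primer_key out) := by unfold Spec_decrypt_ciphertext_autokey; infer_instance

-- ===== CLAIM (what is proved, stated in full; the proofs are below) =====
def Claim_equal_decrypt_ciphertext_autokey : Prop := ∀ (ciphertext : String) (primer_key : String), Dom_decrypt_ciphertext_autokey ciphertext primer_key → Pre_decrypt_ciphertext_autokey ciphertext primer_key → Spec_decrypt_ciphertext_autokey ciphertext primer_key (decrypt_ciphertext_autokey ciphertext primer_key)

-- ===== LEMMAS AND PROOFS =====

lemma pv_insert_nat (ks : List Char) (i : Nat) (c : Char) :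
    PySem.List.insert ks (i : Int) c = ks.take (min i ks.length) ++ c :: ks.drop (min i ks.length) := by
  have h : (PySem.List.sliceIndices ks.length (some (i:Int)) none 1).1.toNat = min i ks.length := by
    simp [PySem.List.sliceIndices]; omega
  simp only [PySem.List.insert, h]

lemma pv_insert_drop (ks : List Char) (i : Nat) (c : Char) :
    (PySem.List.insert ks (i : Int) c).drop (i + 1) = ks.drop i := by
  rw [pv_insert_nat]
  rcases Nat.le_total i ks.length with h | h
  · rw [Nat.min_eq_left h]
    have hlen : i + 1 = (ks.take i).length + 1 := by simp [Nat.min_eq_left h]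
    rw [hlen, List.drop_append]
    simp
  · rw [Nat.min_eq_right h, List.take_length, List.drop_length]
    have h1 : ks.drop i = [] := List.drop_eq_nil_of_le h
    have h2 : (ks ++ [c]).drop (i + 1) = [] := List.drop_eq_nil_of_le (by simp; omega)
    rw [h1, h2]

lemma pv_drop_eq_getElem? {α : Type} {ks stream : List α} {i p : Nat}
    (h : ks.drop i = stream.drop p) : ks[i]? = stream[p]? := by
  have h1 : ks[i]? = (ks.drop i)[0]? := by simp [List.getElem?_drop]
  have h2 : stream[p]? = (stream.drop p)[0]? := by simp [List.getElem?_drop]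
  rw [h1, h2, h]

lemma pv_drop_succ {α : Type} {ks stream : List α} {i p : Nat}
    (h : ks.drop i = stream.drop p) : ks.drop (i + 1) = stream.drop (p + 1) := by
  have h1 : ks.drop (i + 1) = (ks.drop i).drop 1 := by rw [List.drop_drop]
  have h2 : stream.drop (p + 1) = (stream.drop p).drop 1 := by rw [List.drop_drop]
  rw [h1, h2, h]

-- the loop invariant: A's key_stream from position i onwards equals the untouched stream from B's pointer p
lemma pv_loop_eq (rest : List Char) : ∀ (i p : Nat) (pl ks : List Char) (stream : List Char),
    ks.drop i = stream.drop p →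
    ((PySem.List.enumerate rest (i : Int)).foldl pvStepA (pl, ks)).1
      = (rest.foldl (pvStepB stream) (pl, p)).1 := by
  induction rest with
  | nil => intro i p pl ks stream _; simp [PySem.List.enumerate]
  | cons c rest ih =>
    intro i p pl ks stream hdrop
    simp only [PySem.List.enumerate, List.foldl_cons]
    by_cases hc : c ∈ pvALPHABET
    · have hj : ∃ j, PySem.List.index? pvALPHABET c = some j := by
        simp only [PySem.List.index?]
        exact Option.isSome_iff_exists.mp (List.isSome_idxOf?.mpr hc)
      obtain ⟨j, hj⟩ := hj
      have hkey : (PySem.List.pyGet? ks (i : Int)) = (PySem.List.pyGet? stream (p : Int)) := by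
        rw [PySem.List.pyGet?_natCast, PySem.List.pyGet?_natCast]
        exact pv_drop_eq_getElem? hdrop
      have hA : pvStepA (pl, ks) ((i : Int), c) =
          ((pvStepB stream (pl, p) c).1, ks) := by
        simp only [pvStepA, pvStepB, hj, if_pos hc, hkey, Option.getD_some]
      rw [hA]
      have hB : pvStepB stream (pl, p) c = ((pvStepB stream (pl, p) c).1, p + 1) := by
        simp only [pvStepB, hj]
      rw [hB]
      have hcast : ((i : Int) + 1) = ((i + 1 : Nat) : Int) := by push_cast; ring
      rw [hcast]
      exact ih (i + 1) (p + 1) _ ks stream (pv_drop_succ hdrop)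
    · have hj : PySem.List.index? pvALPHABET c = none := by
        simp only [PySem.List.index?, List.idxOf?_eq_none_iff]
        exact hc
      have hA : pvStepA (pl, ks) ((i : Int), c) = (pl ++ [c], PySem.List.insert ks (i : Int) c) := by
        simp only [pvStepA, if_neg hc]
      have hB : pvStepB stream (pl, p) c = (pl ++ [c], p) := by
        simp only [pvStepB, hj]
      rw [hA, hB]
      have hcast : ((i : Int) + 1) = ((i + 1 : Nat) : Int) := by push_cast; ring
      rw [hcast]
      refine ih (i + 1) p _ _ stream ?_
      rw [pv_insert_drop]
      exact hdrop

-- ===== VERDICT (by name: the statement is the Claim_ definition above) =====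
theorem decrypt_ciphertext_autokey_spec : Claim_equal_decrypt_ciphertext_autokey := by
  intro ciphertext primer_key _ _
  unfold Spec_decrypt_ciphertext_autokey decrypt_ciphertext_autokey decrypt_ciphertext_autokey_alt
  have h := pv_loop_eq (PySem.Chars.upper ciphertext.toList) 0 0 []
      (PySem.Chars.upper primer_key.toList ++ PySem.Chars.upper ciphertext.toList)
      (PySem.Chars.upper primer_key.toList ++ PySem.Chars.upper ciphertext.toList) rfl
  simp only [Int.natCast_zero] at h
  simp only []
  rw [h]
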